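-- pv_equiv track=rewrite | github.com/yujin0719/Algorithm | 프로그래머스/2018 KAKAO BLIND RECRUITMENT/[3차]n진수 게임.py | convert
-- ===== SOURCE A (Python) =====
-- def convert(total,base):
--     char = ['0','1','2','3','4','5','6','7','8','9','A','B','C','D','E','F']
--     result = '0'
--     num = 0
--     while len(result) <= total:
--         cur = num
--         tmp = ''
--         while cur > 0:
--             tmp += char[cur % base]
--             cur //= base
--         result += tmp[::-1]
--         num += 1
--     return result
-- ===== SOURCE B (Python) =====
-- def convert(total, base):
--     char = '0123456789ABCDEF'
--     result = '0'
--     digits = []  # digits of the current number, least-significant first (odometer)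
--     while len(result) <= total:
--         digits = _increment(digits, base)
--         result += ''.join(char[d] for d in reversed(digits))
--     return result
--
--
-- def _increment(digits, base):
--     # add 1 to an odometer of base-`base` digits, least-significant first
--     if not digits:
--         return [1]
--     if digits[0] == base - 1:
--         return [0] + _increment(digits[1:], base)
--     return [digits[0] + 1] + digits[1:]
-- ===== Notes on version B (the rewrite author's own statement) =====
-- stated objective: alternative
-- what changed: Instead of re-deriving every counter value's digits with a repeated %-and-// inner loop, B keeps the current number as a list of base-`base` digits and advances it by an odometer-style increment with carry propagation, rendering the digits directly each iteration.
-- outside the precondition, e.g. on convert(3, -2): A returns '0F0F', B returns '0123'; on convert(5, 1): A does not finish within the time limit, B returns '012345'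
import Mathlib
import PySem

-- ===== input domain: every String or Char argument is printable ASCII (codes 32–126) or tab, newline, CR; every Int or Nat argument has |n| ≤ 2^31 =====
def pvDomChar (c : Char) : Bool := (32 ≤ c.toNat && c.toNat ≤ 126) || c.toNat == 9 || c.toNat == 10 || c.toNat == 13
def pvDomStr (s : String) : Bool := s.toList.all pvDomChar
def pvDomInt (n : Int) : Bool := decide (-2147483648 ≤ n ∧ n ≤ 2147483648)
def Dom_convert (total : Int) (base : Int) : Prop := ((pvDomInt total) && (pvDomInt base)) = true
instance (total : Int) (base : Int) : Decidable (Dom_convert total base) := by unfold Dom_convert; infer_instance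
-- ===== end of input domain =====

-- B replaces A's per-number %-and-// digit extraction by an odometer: the current
-- number is kept as a digit list and advanced by increment-with-carry (objective:
-- alternative decomposition, same cost). Equality of the RETURN value is proved on
-- Pre_convert (total ≤ 0, or base between 2 and 16).

-- ===== PORT A =====
def convertCharA : List String :=
  ["0","1","2","3","4","5","6","7","8","9","A","B","C","D","E","F"]

-- inner 'while cur > 0' loop; fuel bounds the iteration count (cur strictly
-- decreases for base ≥ 2, so fuel = initial cur suffices inside Pre_).
-- char[cur % base]: pyGet? is exact; the .getD "" default is reached only
-- where Python raises IndexError (outside Pre_convert).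
def convertRep (base : Int) (cur : Int) (tmp : String) (fuel : Nat) : String :=
  match fuel with
  | 0 => tmp
  | f + 1 =>
    if cur > 0 then
      convertRep base (PySem.Int.floordiv cur base)
        (tmp ++ ((PySem.List.pyGet? convertCharA (PySem.Int.mod cur base)).getD "")) f
    else tmp

-- outer 'while len(result) <= total' loop; result gains ≥ 1 char per iteration
-- once num ≥ 1 (base ≥ 2), so fuel = total.toNat + 2 covers all iterations inside Pre_.
-- tmp[::-1] is Str.slice? … (-1); its .getD "" is never reached (slice? with step -1 is some _).
def convertLoop (total : Int) (base : Int) (result : String) (num : Int) (fuel : Nat) : String :=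
  match fuel with
  | 0 => result
  | f + 1 =>
    if PySem.Str.len result ≤ total then
      convertLoop total base
        (result ++ ((PySem.Str.slice? (convertRep base num "" num.toNat) none none (-1)).getD ""))
        (num + 1) f
    else result

def convert (total : Int) (base : Int) : String :=
  convertLoop total base "0" 0 (total.toNat + 2)

-- ===== PORT B =====
def convertCharB : String := "0123456789ABCDEF"

-- _increment: odometer increment, least-significant digit first
def convertInc (base : Int) (digits : List Int) : List Int :=
  match digits with
  | [] => [1]
  | d :: rest => if d = base - 1 then 0 :: convertInc base rest else (d + 1) :: rest

-- ''.join(char[d] for d in reversed(digits)); char[d] is a 1-char string: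
-- Str.pyGet? gives the Char, String.singleton rebuilds Python's 1-char string;
-- the .getD "" default is reached only where Python raises IndexError (outside Pre_).
def convertRender (digits : List Int) : String :=
  String.join (digits.reverse.map
    (fun d => ((PySem.Str.pyGet? convertCharB d).map String.singleton).getD ""))

-- outer 'while len(result) <= total' loop of Source B; each iteration appends ≥ 1 char
-- (the incremented digit list is never empty), so fuel = total.toNat + 1 covers it.
def convertAltLoop (total : Int) (base : Int) (result : String) (digits : List Int)
    (fuel : Nat) : String :=
  match fuel with
  | 0 => result
  | f + 1 =>
    if PySem.Str.len result ≤ total then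
      convertAltLoop total base (result ++ convertRender (convertInc base digits))
        (convertInc base digits) f
    else result

def convert_alt (total : Int) (base : Int) : String :=
  convertAltLoop total base "0" [] (total.toNat + 1)

-- ===== PRECONDITION & SPEC =====
-- Pre_ admits every input on which A terminates normally except negative bases with
-- total ≥ 1 (there A emits characters via negative list indices, a value no
-- specification would assign, and B's digits differ): with total ≥ 1, base 0 raises
-- ZeroDivisionError, base 1 loops forever, and a base ≥ 17 raises IndexError exactly
-- once total ≥ 16 forces the sequence past the number 15 (char[16]).
def Pre_convert (total : Int) (base : Int) : Prop :=
  total ≤ 0 ∨ (2 ≤ base ∧ (base ≤ 16 ∨ total ≤ 15))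
instance (total : Int) (base : Int) : Decidable (Pre_convert total base) := by
  unfold Pre_convert; infer_instance

def pvWitness_convert : Int × Int := (5, 2)

def Spec_convert (total : Int) (base : Int) (out : String) : Prop := out = convert_alt total base
instance (total : Int) (base : Int) (out : String) : Decidable (Spec_convert total base out) := by
  unfold Spec_convert; infer_instance

-- ===== CLAIM (what is proved, stated in full; the proofs are below) =====
def Claim_equal_convert : Prop := ∀ (total : Int) (base : Int), Dom_convert total base → Pre_convert total base → Spec_convert total base (convert total base)

-- ===== LEMMAS AND PROOFS =====

-- canonical base-b digits of n, least-significant first ([] for 0); the common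
-- description both loops are reduced to.
def canonDigits (b : Nat) (n : Nat) : List Int :=
  if h : b ≤ 1 ∨ n = 0 then [] else ((n % b : Nat) : Int) :: canonDigits b (n / b)
  termination_by n
  decreasing_by
    simp only [not_or] at h
    exact Nat.div_lt_self (Nat.pos_of_ne_zero h.2) (by omega)

def charA (d : Int) : String := (PySem.List.pyGet? convertCharA d).getD ""

def charB (d : Int) : String :=
  ((PySem.Str.pyGet? convertCharB d).map String.singleton).getD ""

lemma charA_eq_charB (d : Int) (h0 : 0 ≤ d) (h1 : d < 16) : charA d = charB d := by
  interval_cases d <;> rfl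

lemma charA_len (d : Int) (h0 : 0 ≤ d) (h1 : d < 16) : (charA d).toList.length ≤ 1 := by
  interval_cases d <;> decide

lemma canonDigits_zero (b : Nat) : canonDigits b 0 = [] := by
  unfold canonDigits; simp

lemma canonDigits_pos (b n : Nat) (hb : 2 ≤ b) (hn : 0 < n) :
    canonDigits b n = ((n % b : Nat) : Int) :: canonDigits b (n / b) := by
  rw [canonDigits, dif_neg (by omega)]

lemma canonDigits_bounds (b n : Nat) (hb : 2 ≤ b) :
    ∀ d ∈ canonDigits b n, 0 ≤ d ∧ d < (b : Int) := by
  induction n using Nat.strong_induction_on with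
  | _ n ih =>
    by_cases hn : n = 0
    · simp [hn, canonDigits_zero]
    · rw [canonDigits_pos b n hb (Nat.pos_of_ne_zero hn)]
      intro d hd
      rcases List.mem_cons.mp hd with h | h
      · subst h
        refine ⟨Int.natCast_nonneg _, ?_⟩
        exact_mod_cast Nat.mod_lt n (by omega)
      · exact ih (n / b) (Nat.div_lt_self (Nat.pos_of_ne_zero hn) (by omega)) d h

lemma convertInc_canon (b n : Nat) (base : Int) (hb : 2 ≤ b) (hbase : base = (b : Int)) :
    convertInc base (canonDigits b n) = canonDigits b (n + 1) := by
  induction n using Nat.strong_induction_on with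
  | _ n ih =>
    by_cases hn : n = 0
    · subst hn
      rw [canonDigits_zero, canonDigits_pos b 1 hb (by omega),
        Nat.mod_eq_of_lt (by omega), Nat.div_eq_of_lt (by omega), canonDigits_zero]
      rfl
    · have hpos : 0 < n := Nat.pos_of_ne_zero hn
      rw [canonDigits_pos b n hb hpos, canonDigits_pos b (n + 1) hb (by omega)]
      have hdm := Nat.div_add_mod n b
      by_cases hcar : n % b = b - 1
      · -- carry: last digit is b-1, it becomes 0 and the rest is incremented
        have hstep : n + 1 = (n / b + 1) * b := by
          have hexp : (n / b + 1) * b = b * (n / b) + b := by ring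
          omega
        have hmod : (n + 1) % b = 0 := by rw [hstep]; exact Nat.mul_mod_left _ _
        have hdiv : (n + 1) / b = n / b + 1 := by
          rw [hstep]; exact Nat.mul_div_cancel _ (by omega)
        rw [convertInc]
        have : ((n % b : Nat) : Int) = base - 1 := by rw [hcar, hbase]; omega
        rw [if_pos this, ih (n / b) (Nat.div_lt_self hpos (by omega)), hmod, hdiv]
        simp
      · -- no carry: only the last digit is incremented
        have hlt : n % b < b := Nat.mod_lt n (by omega)
        have hdiv : (n + 1) / b = n / b := by
          have h1 : n + 1 = b * (n / b) + (n % b + 1) := by omega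
          rw [h1, Nat.mul_add_div (by omega),
            Nat.div_eq_of_lt (show n % b + 1 < b by omega), Nat.add_zero]
        have hmod : (n + 1) % b = n % b + 1 := by
          have h2 := Nat.div_add_mod (n + 1) b
          rw [hdiv] at h2
          omega
        rw [convertInc]
        have hne : ¬ ((n % b : Nat) : Int) = base - 1 := by
          rw [hbase]
          intro hcontra
          have : (n % b : Nat) = b - 1 := by omega
          exact hcar this
        rw [if_neg hne, hmod, hdiv]
        norm_cast

-- String.join (s :: t) = s ++ String.join t, via character lists
lemma join_cons (s : String) (t : List String) : String.join (s :: t) = s ++ String.join t := by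
  apply String.ext
  simp [String.toList_join]

lemma convertRep_eq (base : Int) (b : Nat) (hb : 2 ≤ b) (hbase : base = (b : Int)) :
    ∀ (fuel : Nat) (n : Nat) (tmp : String), n ≤ fuel →
      convertRep base (n : Int) tmp fuel = tmp ++ String.join ((canonDigits b n).map charA) := by
  intro fuel
  induction fuel with
  | zero =>
    intro n tmp hn
    have : n = 0 := by omega
    subst this
    simp [convertRep, canonDigits_zero, String.join]
  | succ f ihf =>
    intro n tmp hn
    by_cases hn0 : n = 0
    · subst hn0
      simp [convertRep, canonDigits_zero, String.join]
    · have hpos : 0 < n := Nat.pos_of_ne_zero hn0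
      rw [convertRep, if_pos (by exact_mod_cast hpos)]
      rw [show PySem.Int.floordiv ((n : Nat) : Int) base = ((n / b : Nat) : Int) by
            rw [hbase]; exact PySem.Int.floordiv_natCast n b,
          show PySem.Int.mod ((n : Nat) : Int) base = ((n % b : Nat) : Int) by
            rw [hbase]; exact PySem.Int.mod_natCast n b]
      rw [ihf (n / b) _ (by
        have := Nat.div_lt_self hpos (show 1 < b by omega); omega)]
      rw [canonDigits_pos b n hb hpos, List.map_cons, join_cons, ← String.append_assoc]
      rfl

lemma join_reverse (l : List String) (h : ∀ s ∈ l, s.toList.length ≤ 1) :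
    String.ofList (String.join l).toList.reverse = String.join l.reverse := by
  apply String.ext
  rw [String.toList_ofList, String.toList_join, String.toList_join, List.map_reverse,
    List.reverse_flatten]
  congr 1
  congr 1
  rw [List.map_map]
  apply List.map_congr_left
  intro s hs
  simp only [Function.comp_apply]
  have hle := h s hs
  interval_cases hl : s.toList.length
  · simp [List.length_eq_zero_iff.mp hl]
  · obtain ⟨a, ha⟩ := List.length_eq_one_iff.mp hl
    simp [ha]

lemma canonDigits_le (b n : Nat) (hb : 2 ≤ b) :
    ∀ d ∈ canonDigits b n, d ≤ (n : Int) := by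
  induction n using Nat.strong_induction_on with
  | _ n ih =>
    by_cases hn : n = 0
    · simp [hn, canonDigits_zero]
    · rw [canonDigits_pos b n hb (Nat.pos_of_ne_zero hn)]
      intro d hd
      rcases List.mem_cons.mp hd with h | h
      · subst h; exact_mod_cast Nat.mod_le n b
      · have hlt := Nat.div_lt_self (Nat.pos_of_ne_zero hn) (show 1 < b by omega)
        have := ih (n / b) hlt d h
        have : d ≤ ((n / b : Nat) : Int) := this
        have hc : ((n / b : Nat) : Int) ≤ (n : Int) := by exact_mod_cast Nat.le_of_lt hlt
        omega

lemma charB_len (d : Int) (h0 : 0 ≤ d) (h1 : d < 16) : (charB d).toList.length = 1 := by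
  interval_cases d <;> decide

lemma join_len (l : List String) (h : ∀ s ∈ l, s.toList.length = 1) :
    (String.join l).toList.length = l.length := by
  induction l with
  | nil => rfl
  | cons s t ih =>
    rw [join_cons, String.toList_append, List.length_append, h s (List.mem_cons_self ..),
      ih (fun x hx => h x (List.mem_cons_of_mem _ hx)), List.length_cons, Nat.add_comm]

lemma render_len (ds : List Int) (h : ∀ d ∈ ds, 0 ≤ d ∧ d < 16) :
    (convertRender ds).toList.length = ds.length := by
  rw [convertRender, join_len, List.length_map, List.length_reverse]
  intro s hs
  obtain ⟨d, hd, rfl⟩ := List.mem_map.mp hs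
  rw [List.mem_reverse] at hd
  exact charB_len d (h d hd).1 (h d hd).2

lemma render_eq (base : Int) (b : Nat) (hb : 2 ≤ b) (hbase : base = (b : Int))
    (n : Nat) (h16 : ∀ d ∈ canonDigits b n, d < 16) :
    ((PySem.Str.slice? (String.join ((canonDigits b n).map charA)) none none (-1)).getD "")
      = convertRender (canonDigits b n) := by
  rw [PySem.Str.slice?_none_none_neg_one, Option.getD_some]
  have hbound := canonDigits_bounds b n hb
  rw [join_reverse _ (by
    intro s hs
    obtain ⟨d, hd, rfl⟩ := List.mem_map.mp hs
    exact charA_len d (hbound d hd).1 (h16 d hd))]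
  rw [convertRender, ← List.map_reverse]
  congr 1
  apply List.map_congr_left
  intro d hd
  rw [List.mem_reverse] at hd
  exact charA_eq_charB d (hbound d hd).1 (h16 d hd)

-- the joint loop invariant: A is at num = n+1, B's odometer shows n, the produced
-- string r is shared, and r is longer than n (so for base ≥ 17, Pre_'s total ≤ 15
-- keeps every emitted number ≤ 15, a single digit below 16)
lemma loop_eq (total base : Int) (b : Nat) (hb : 2 ≤ b)
    (hB : b ≤ 16 ∨ total ≤ 15) (hbase : base = (b : Int)) :
    ∀ (fuel : Nat) (r : String) (n : Nat), (n : Int) < PySem.Str.len r →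
      convertLoop total base r ((n : Int) + 1) fuel
        = convertAltLoop total base r (canonDigits b n) fuel := by
  intro fuel
  induction fuel with
  | zero => intro r n _; rfl
  | succ f ihf =>
    intro r n hinv
    rw [convertLoop, convertAltLoop]
    by_cases hg : PySem.Str.len r ≤ total
    · rw [if_pos hg, if_pos hg]
      have h16 : ∀ d ∈ canonDigits b (n + 1), d < 16 := by
        intro d hd
        rcases hB with hB | hB
        · have := (canonDigits_bounds b (n + 1) hb d hd).2
          omega
        · have := canonDigits_le b (n + 1) hb d hd
          push_cast at this
          omega
      have htn : ((n : Int) + 1).toNat = n + 1 := by omega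
      have hrep := convertRep_eq base b hb hbase (n + 1) (n + 1) "" (le_refl _)
      rw [String.empty_append] at hrep
      have hcast : ((n : Int) + 1) = ((n + 1 : Nat) : Int) := by push_cast; ring
      rw [htn, hcast, hrep, render_eq base b hb hbase (n + 1) h16,
        ← convertInc_canon b n base hb hbase]
      have hlen : ((n : Nat) + 1 : Int) <
          PySem.Str.len (r ++ convertRender (convertInc base (canonDigits b n))) := by
        rw [PySem.Str.len_append, PySem.Str.len_eq (convertRender _),
          convertInc_canon b n base hb hbase,
          render_len _ (fun d hd => ⟨(canonDigits_bounds b (n + 1) hb d hd).1, h16 d hd⟩)]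
        have hne : canonDigits b (n + 1) ≠ [] := by
          rw [canonDigits_pos b (n + 1) hb (by omega)]; exact List.cons_ne_nil _ _
        have : 1 ≤ (canonDigits b (n + 1)).length := List.length_pos_iff.mpr hne
        have : (1 : Int) ≤ ((canonDigits b (n + 1)).length : Int) := by exact_mod_cast this
        omega
      calc convertLoop total base (r ++ convertRender (convertInc base (canonDigits b n)))
              (((n + 1 : Nat) : Int) + 1) f
          = convertAltLoop total base (r ++ convertRender (convertInc base (canonDigits b n)))
              (canonDigits b (n + 1)) f := ihf _ (n + 1) (by exact_mod_cast hlen)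
        _ = convertAltLoop total base (r ++ convertRender (convertInc base (canonDigits b n)))
              (convertInc base (canonDigits b n)) f := by
              rw [convertInc_canon b n base hb hbase]
    · rw [if_neg hg, if_neg hg]

-- ===== VERDICT (by name: the statement is the Claim_ definition above) =====
theorem convert_spec : Claim_equal_convert := by
  intro total base _hdom hpre
  unfold Spec_convert convert convert_alt
  by_cases ht : total ≤ 0
  · -- the loop guard 1 ≤ total is false at once in both loops
    have h0 : total.toNat = 0 := by omega
    have hg : ¬ PySem.Str.len "0" ≤ total := by
      have : PySem.Str.len "0" = 1 := by decide
      omega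
    rw [h0]
    rw [convertLoop, if_neg hg, convertAltLoop, if_neg hg]
  · rcases hpre with h | ⟨hb2, hB0⟩
    · omega
    · have hbase : base = (base.toNat : Int) := by omega
      have hb : 2 ≤ base.toNat := by omega
      have hB : base.toNat ≤ 16 ∨ total ≤ 15 := by omega
      have hg : PySem.Str.len "0" ≤ total := by
        have : PySem.Str.len "0" = 1 := by decide
        omega
      -- unroll A's first iteration (num = 0 appends the empty string)
      rw [show total.toNat + 2 = (total.toNat + 1) + 1 from rfl, convertLoop, if_pos hg]
      rw [show convertRep base 0 "" (Int.toNat 0) = "" from rfl,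
        show ("0" : String) ++ ((PySem.Str.slice? "" none none (-1)).getD "") = "0" by decide]
      have := loop_eq total base base.toNat hb hB hbase (total.toNat + 1) "0" 0
        (by have : PySem.Str.len "0" = 1 := by decide
            omega)
      simpa [canonDigits_zero] using this
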